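-- pv_equiv track=rewrite | github.com/MichaelOw/doMe | src/simple_parser.py | dateSpaceAdder
-- ===== SOURCE A (Python) =====
-- monthList = {'jan' : 1, 'feb' : 2, 'mar' : 3, 'apr' : 4, 'may' : 5, 'jun' : 6, 'jul' : 7, 'aug' : 8, 'sep' : 9, 'oct' : 10, 'nov' : 11, 'dec' : 12, 'january' : 1, 'february' : 2, 'march' : 3, 'april' : 4, 'may' : 5, 'june' : 6, 'july' : 7, 'august' : 8, 'september' : 9, 'october' : 10, 'november' : 11, 'december' : 12}
--
-- def dateSpaceAdder(text):
--     i = 0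
--     while i < len(text) - 2:
--         if text[i:i+3].lower() in monthList:
--             if i-1 > -1 and text[i-1].isdigit():
--                 text = text[:i] + ' ' + text[i:]
--         i+=1
--     return text
-- ===== SOURCE B (Python) =====
-- MONTHS = frozenset(('jan', 'feb', 'mar', 'apr', 'may', 'jun',
--                     'jul', 'aug', 'sep', 'oct', 'nov', 'dec'))
--
-- def dateSpaceAdder(text):
--     # Single left-to-right pass over the ORIGINAL string: emit a space before
--     # any 3-letter month abbreviation whose preceding character is a digit.
--     out = []
--     prev = None
--     for k, c in enumerate(text):
--         if prev is not None and prev.isdigit() and text[k:k+3].lower() in MONTHS: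
--             out.append(' ')
--         out.append(c)
--         prev = c
--     return ''.join(out)
-- ===== Notes on version B (the rewrite author's own statement) =====
-- stated objective: faster
-- what changed: A repeatedly rebuilds the whole string inside a while-loop over the mutating text (re-scanning shifted positions after each insertion); B makes one left-to-right pass over the original string, emitting a space before each digit-preceded 3-letter month abbreviation and joining the pieces once.
import Mathlib
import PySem

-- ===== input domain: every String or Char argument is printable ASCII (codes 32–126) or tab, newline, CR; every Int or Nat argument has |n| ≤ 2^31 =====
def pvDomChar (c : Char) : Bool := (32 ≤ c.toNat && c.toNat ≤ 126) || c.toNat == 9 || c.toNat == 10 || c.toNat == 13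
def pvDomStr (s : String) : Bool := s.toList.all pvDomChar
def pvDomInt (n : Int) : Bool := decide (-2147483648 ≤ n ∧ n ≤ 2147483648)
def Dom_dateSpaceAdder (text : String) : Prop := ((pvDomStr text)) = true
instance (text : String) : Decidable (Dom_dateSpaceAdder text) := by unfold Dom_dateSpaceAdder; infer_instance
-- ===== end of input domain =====

-- B replaces A's while-loop over the repeatedly rebuilt string by a single pass
-- over the original string that splices a space before each digit-preceded
-- 3-letter month abbreviation (objective: faster, measured; return value only).

-- ===== PORT A =====
-- keys of `monthList` in dict insertion order (the duplicate key 'may' appears once)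
def monthKeys12 : List (List Char) :=
  [['j','a','n'], ['f','e','b'], ['m','a','r'], ['a','p','r'], ['m','a','y'], ['j','u','n'],
   ['j','u','l'], ['a','u','g'], ['s','e','p'], ['o','c','t'], ['n','o','v'], ['d','e','c']]
def monthKeysLong : List (List Char) :=
  [['j','a','n','u','a','r','y'], ['f','e','b','r','u','a','r','y'], ['m','a','r','c','h'],
   ['a','p','r','i','l'], ['j','u','n','e'], ['j','u','l','y'], ['a','u','g','u','s','t'],
   ['s','e','p','t','e','m','b','e','r'], ['o','c','t','o','b','e','r'],
   ['n','o','v','e','m','b','e','r'], ['d','e','c','e','m','b','e','r']]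
def monthKeys : List (List Char) := monthKeys12 ++ monthKeysLong

-- text[i-1].isdigit() under the guard i-1 > -1 (index always in range there; exact)
def prevDigit : Option Char → Bool
  | some d => PySem.Chars.isdigit d
  | none => false

-- A's while-loop; i only grows, text only gains spaces.  Fuel is a totality
-- guard only: the loop provably runs at most 2*len+1 iterations (see loop_eq).
-- text[i:i+3] with i ≥ 0 is exactly (t.drop i).take 3; text[:i]+' '+text[i:] is take/drop.
def aLoop : Nat → Nat → List Char → List Char
  | 0, _, t => t
  | fuel+1, i, t =>
    if i + 2 < t.length then
      let t' := if monthKeys.contains (PySem.Chars.lower ((t.drop i).take 3)) then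
                  if decide (1 ≤ i) && prevDigit t[i-1]? then
                    t.take i ++ ' ' :: t.drop i
                  else t
                else t
      aLoop fuel (i+1) t'
    else t

def dateSpaceAdder (text : String) : String :=
  String.ofList (aLoop (2 * text.toList.length + 1) 0 text.toList)

-- ===== PORT B =====
-- one pass carrying the previous character; text[k:k+3] is c :: rest.take 2
def bGo : Option Char → List Char → List Char
  | _, [] => []
  | prev, c :: rest =>
    if prevDigit prev && monthKeys12.contains (PySem.Chars.lower (c :: rest.take 2)) then
      ' ' :: c :: bGo (some c) rest
    else
      c :: bGo (some c) rest

def dateSpaceAdder_alt (text : String) : String :=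
  String.ofList (bGo none text.toList)

-- ===== PRECONDITION & SPEC =====
def Spec_dateSpaceAdder (text : String) (out : String) : Prop := out = dateSpaceAdder_alt text
instance (text : String) (out : String) : Decidable (Spec_dateSpaceAdder text out) := by unfold Spec_dateSpaceAdder; infer_instance

-- ===== CLAIM (what is proved, stated in full; the proofs are below) =====
def Claim_equal_dateSpaceAdder : Prop := ∀ (text : String), Dom_dateSpaceAdder text → Spec_dateSpaceAdder text (dateSpaceAdder text)

-- ===== LEMMAS AND PROOFS =====

lemma not_mem_keys12 (l : List Char) (h : l.length ≠ 3) : l ∉ monthKeys12 := by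
  intro hm
  apply h
  fin_cases hm <;> rfl

lemma not_mem_keysLong (l : List Char) (h : l.length = 3) : l ∉ monthKeysLong := by
  intro hm
  fin_cases hm <;> simp_all

lemma mem_keys_iff (l : List Char) (h : l.length = 3) :
    l ∈ monthKeys ↔ l ∈ monthKeys12 := by
  simp [monthKeys, List.mem_append, not_mem_keysLong l h]

lemma bGo_short (prev : Option Char) (rem : List Char) (h : rem.length ≤ 2) :
    bGo prev rem = rem := by
  match rem, h with
  | [], _ => rfl
  | [a], _ =>
    simp [bGo, not_mem_keys12 (PySem.Chars.lower [a]) (by simp [PySem.Chars.lower])]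
  | [a, b], _ =>
    simp [bGo, not_mem_keys12 (PySem.Chars.lower [a, b]) (by simp [PySem.Chars.lower]),
          not_mem_keys12 (PySem.Chars.lower [b]) (by simp [PySem.Chars.lower])]

lemma getElem?_append_last (done rem : List Char) (h : done ≠ []) :
    (done ++ rem)[done.length - 1]? = done.getLast? := by
  have hlt : done.length - 1 < done.length := by
    cases done with
    | nil => exact absurd rfl h
    | cons x xs => simp
  rw [List.getElem?_append_left hlt, List.getLast?_eq_getElem?]

-- A's digit-guard at state (i = done.length, t = done ++ rem) looks at the last char of done
lemma digit_guard (done rem : List Char) :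
    (decide (1 ≤ done.length) && prevDigit (done ++ rem)[done.length - 1]?) =
      prevDigit done.getLast? := by
  cases done with
  | nil => rfl
  | cons x xs =>
    rw [getElem?_append_last _ _ (by simp)]
    simp

lemma loop_eq (rem : List Char) : ∀ (done : List Char) (fuel : Nat),
    2 * rem.length + 1 ≤ fuel →
    aLoop fuel done.length (done ++ rem) = done ++ bGo done.getLast? rem := by
  induction rem with
  | nil =>
    intro done fuel h
    obtain ⟨f, rfl⟩ : ∃ f, fuel = f + 1 := ⟨fuel - 1, by omega⟩
    simp [aLoop, bGo]
  | cons c rs ih =>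
    intro done fuel h
    obtain ⟨f, rfl⟩ : ∃ f, fuel = f + 1 := ⟨fuel - 1, by omega⟩
    match rs, h, ih with
    | [], h, ih =>
      have hg : ¬ (done.length + 2 < (done ++ [c]).length) := by simp
      simp only [aLoop]
      rw [if_neg (by simp), bGo_short _ _ (by simp)]
    | [c2], h, ih =>
      have hg : ¬ (done.length + 2 < (done ++ [c, c2]).length) := by simp
      simp only [aLoop]
      rw [if_neg (by simp), bGo_short _ _ (by simp)]
    | c2 :: c3 :: rs', h, ih =>
      have hg : done.length + 2 < (done ++ c :: c2 :: c3 :: rs').length := by simp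
      have hdrop : List.drop done.length (done ++ c :: c2 :: c3 :: rs') = c :: c2 :: c3 :: rs' :=
        List.drop_left
      have hlen3 : (PySem.Chars.lower [c, c2, c3]).length = 3 := by simp [PySem.Chars.lower]
      by_cases htrig : prevDigit done.getLast? = true ∧
          PySem.Chars.lower [c, c2, c3] ∈ monthKeys12
      · -- insertion step: two iterations of A consume the inserted space and c
        have hmonthM : PySem.Chars.lower [c, c2, c3] ∈ monthKeys :=
          (mem_keys_iff _ hlen3).mpr htrig.2
        have hdig : (decide (1 ≤ done.length) &&
            prevDigit (done ++ c :: c2 :: c3 :: rs')[done.length - 1]?) = true := by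
          rw [digit_guard]; exact htrig.1
        have step1 : ∀ g : Nat, aLoop (g + 1) done.length (done ++ c :: c2 :: c3 :: rs') =
            aLoop g (done.length + 1) (done ++ ' ' :: c :: c2 :: c3 :: rs') := by
          intro g
          simp only [aLoop, if_pos hg, hdrop]
          simp [hdig, hmonthM]
        obtain ⟨f', rfl⟩ : ∃ f', f = f' + 1 := ⟨f - 1, by simp at h; omega⟩
        have hg2 : done.length + 1 + 2 < (done ++ ' ' :: c :: c2 :: c3 :: rs').length := by
          simp; omega
        have step2 : ∀ g : Nat, aLoop (g + 1) (done.length + 1)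
              (done ++ ' ' :: c :: c2 :: c3 :: rs') =
            aLoop g (done.length + 1 + 1) (done ++ ' ' :: c :: c2 :: c3 :: rs') := by
          intro g
          simp only [aLoop, if_pos hg2]
          simp [prevDigit, PySem.Chars.isdigit]
        rw [step1 (f' + 1), step2 f']
        rw [show done ++ ' ' :: c :: c2 :: c3 :: rs' = (done ++ [' ', c]) ++ c2 :: c3 :: rs'
              by simp,
            show done.length + 1 + 1 = (done ++ [' ', c]).length by simp]
        rw [ih (done ++ [' ', c]) f' (by simp at h ⊢; omega)]
        rw [show (done ++ [' ', c]).getLast? = some c from by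
              rw [show done ++ [' ', c] = (done ++ [' ']) ++ [c] by simp]
              exact List.getLast?_concat]
        have hb : bGo done.getLast? (c :: c2 :: c3 :: rs') =
            ' ' :: c :: bGo (some c) (c2 :: c3 :: rs') := by
          simp [bGo, htrig.1, htrig.2]
        rw [hb]; simp
      · -- no insertion: one iteration of A consumes c
        have hcond : PySem.Chars.lower [c, c2, c3] ∈ monthKeys →
            (decide (1 ≤ done.length) &&
              prevDigit (done ++ c :: c2 :: c3 :: rs')[done.length - 1]?) = false := by
          intro hm
          rw [digit_guard]
          have hmem : PySem.Chars.lower [c, c2, c3] ∈ monthKeys12 := (mem_keys_iff _ hlen3).mp hm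
          cases hd : prevDigit done.getLast?
          · rfl
          · exact absurd ⟨hd, hmem⟩ htrig
        have step1 : aLoop (f + 1) done.length (done ++ c :: c2 :: c3 :: rs') =
            aLoop f (done.length + 1) (done ++ c :: c2 :: c3 :: rs') := by
          simp only [aLoop, if_pos hg, hdrop]
          by_cases hm : PySem.Chars.lower [c, c2, c3] ∈ monthKeys
          · simp [hm, hcond hm]
          · simp [hm]
        rw [step1]
        rw [show done ++ c :: c2 :: c3 :: rs' = (done ++ [c]) ++ c2 :: c3 :: rs' by simp,
            show done.length + 1 = (done ++ [c]).length by simp]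
        rw [ih (done ++ [c]) f (by simp at h ⊢; omega), List.getLast?_concat]
        have hb : bGo done.getLast? (c :: c2 :: c3 :: rs') =
            c :: bGo (some c) (c2 :: c3 :: rs') := by
          have : ¬ (prevDigit done.getLast? = true ∧
              PySem.Chars.lower [c, c2, c3] ∈ monthKeys12) := htrig
          simp only [bGo]
          rw [if_neg]
          simpa using fun hd hmem => htrig ⟨hd, hmem⟩
        rw [hb]; simp

-- ===== VERDICT (by name: the statement is the Claim_ definition above) =====
theorem dateSpaceAdder_spec : Claim_equal_dateSpaceAdder := by
  intro text _
  unfold Spec_dateSpaceAdder dateSpaceAdder dateSpaceAdder_alt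
  have h := loop_eq text.toList [] (2 * text.toList.length + 1) (by omega)
  simpa using congrArg String.ofList h
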